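-- pv_equiv track=rewrite | github.com/miliar/Code_Jam_Webscraper | solutions_python/Problem_181/1403.py | solve
-- ===== SOURCE A (Python) =====
-- def solve(S):
--     res = S[0]
--     S = S[1:]
--     for s in S:
--         if s >= res[0]:
--             res = s + res
--         else:
--             res = res + s
--     return res
-- ===== SOURCE B (Python) =====
-- def solve(S):
--     # Pass 1: table of prefix maxima pm[i] = max(S[:i+1]).
--     pm = []
--     m = S[0]
--     for ch in S:
--         if ch > m:
--             m = ch
--         pm.append(m)
--     # Pass 2: partition the tail against the table (zip pairs S[i] with pm[i-1]).
--     rest = S[1:]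
--     front = [c for c, p in zip(rest, pm) if c >= p]
--     back = [c for c, p in zip(rest, pm) if c < p]
--     return ''.join(reversed(front)) + S[0] + ''.join(back)
-- ===== Notes on version B (the rewrite author's own statement) =====
-- stated objective: faster
-- what changed: B replaces A's stateful loop that grows one string by repeated concatenation with staged passes: it first precomputes a prefix-maxima table, then partitions the tail by two filters against that table and joins the pieces once.
import Mathlib
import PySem

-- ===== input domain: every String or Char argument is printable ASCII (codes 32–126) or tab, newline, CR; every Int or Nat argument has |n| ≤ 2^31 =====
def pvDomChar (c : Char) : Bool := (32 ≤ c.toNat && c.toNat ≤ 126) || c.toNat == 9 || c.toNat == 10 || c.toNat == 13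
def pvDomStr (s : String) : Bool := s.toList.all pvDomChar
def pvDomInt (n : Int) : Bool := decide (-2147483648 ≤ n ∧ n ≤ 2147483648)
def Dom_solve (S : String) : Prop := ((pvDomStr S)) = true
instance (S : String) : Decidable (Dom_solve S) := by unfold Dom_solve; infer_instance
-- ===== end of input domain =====

-- B precomputes a prefix-maxima table and partitions the tail against it in separate
-- passes, instead of A's stateful loop that grows one string by repeated concatenation.

-- ===== PORT A =====
-- loop body: if s >= res[0]: res = s + res else: res = res + s
def stepA (res : List Char) (s : Char) : List Char :=
  match res with
  | [] => [s]                  -- unreachable: res stays nonempty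
  | r :: _ => if r ≤ s then s :: res else res ++ [s]

def solveLoop (l : List Char) (res : List Char) : List Char :=
  l.foldl stepA res

-- res = S[0]; for s in S[1:]: ...
def solve (S : String) : String :=
  match S.toList with
  | [] => ""                   -- Python raises IndexError here; excluded by Pre_solve
  | c :: rest => String.ofList (solveLoop rest [c])

-- ===== PORT B =====
-- pm = []; m = S[0]; for ch in S: if ch > m: m = ch; pm.append(m)
def pmFold (S : List Char) (c0 : Char) : Char × List Char :=
  S.foldl (fun st ch =>
    let m' := if st.1 < ch then ch else st.1
    (m', st.2 ++ [m'])) (c0, [])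

-- front/back = comprehensions over zip(rest, pm); join once at the end
def solve_alt (S : String) : String :=
  match S.toList with
  | [] => ""                   -- Python raises IndexError here; excluded by Pre_solve
  | c :: rest =>
    let pm := (pmFold (c :: rest) c).2
    let front := ((rest.zip pm).filter (fun p => decide (p.2 ≤ p.1))).map Prod.fst
    let back := ((rest.zip pm).filter (fun p => decide (p.1 < p.2))).map Prod.fst
    String.ofList (front.reverse ++ c :: back)

-- ===== PRECONDITION & SPEC =====
-- A (and B) raise IndexError on the empty string; Pre_ excludes exactly that input.
def Pre_solve (S : String) : Prop := S ≠ ""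
instance (S : String) : Decidable (Pre_solve S) := by unfold Pre_solve; infer_instance
def pvWitness_solve : String := "ba"
def Spec_solve (S : String) (out : String) : Prop := out = solve_alt S
instance (S : String) (out : String) : Decidable (Spec_solve S out) := by unfold Spec_solve; infer_instance

-- ===== CLAIM (what is proved, stated in full; the proofs are below) =====
def Claim_equal_solve : Prop := ∀ (S : String), Dom_solve S → Pre_solve S → Spec_solve S (solve S)

-- ===== LEMMAS AND PROOFS =====

-- updated running max as Source B computes it
def updC (m s : Char) : Char := if m < s then s else m

-- tail of the prefix-maxima table, starting from running max m
def pmsL (m : Char) : List Char → List Char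
  | [] => []
  | s :: t => updC m s :: pmsL (updC m s) t

-- zip of the tail with the max of everything BEFORE each element
def zipPre (m : Char) : List Char → List (Char × Char)
  | [] => []
  | s :: t => (s, m) :: zipPre (updC m s) t

lemma pmFold_snd (l : List Char) : ∀ (m : Char) (acc : List Char),
    (l.foldl (fun st ch =>
      let m' := if st.1 < ch then ch else st.1
      (m', st.2 ++ [m'])) (m, acc)).2 = acc ++ pmsL m l := by
  induction l with
  | nil => intro m acc; simp [pmsL]
  | cons s t ih =>
    intro m acc
    simp only [List.foldl_cons, pmsL]
    rw [ih]
    simp [updC]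

lemma zip_pms (l : List Char) : ∀ m : Char, l.zip (m :: pmsL m l) = zipPre m l := by
  induction l with
  | nil => intro m; simp [zipPre]
  | cons s t ih =>
    intro m
    simp only [pmsL, zipPre, List.zip_cons_cons]
    rw [ih]

-- A's step tests the head of res; when head? res = some mx that is the comparison with mx.
lemma step_eq (res : List Char) (s mx : Char) (h : res.head? = some mx) :
    stepA res s = if mx ≤ s then s :: res else res ++ [s] := by
  cases res with
  | nil => simp at h
  | cons a t =>
    simp only [List.head?_cons, Option.some.injEq] at h
    subst h
    rfl

-- Loop invariant: A's res equals front.reverse ++ c :: back, its head is the running max m,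
-- and the remaining loop contributes exactly B's two filters of zipPre m l.
lemma loop_eq (l : List Char) : ∀ (c m : Char) (front back : List Char),
    (front.reverse ++ c :: back).head? = some m →
    solveLoop l (front.reverse ++ c :: back) =
      (front ++ ((zipPre m l).filter (fun p => decide (p.2 ≤ p.1))).map Prod.fst).reverse
        ++ c :: (back ++ ((zipPre m l).filter (fun p => decide (p.1 < p.2))).map Prod.fst) := by
  induction l with
  | nil => intro c m front back _; simp [solveLoop, zipPre]
  | cons s t ih =>
    intro c m front back hmx
    have hstep : solveLoop (s :: t) (front.reverse ++ c :: back)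
        = solveLoop t (stepA (front.reverse ++ c :: back) s) := rfl
    rw [hstep, step_eq _ s m hmx]
    by_cases h : m ≤ s
    · have hupd : updC m s = s := by
        unfold updC
        rcases lt_or_eq_of_le h with h' | h'
        · simp [h']
        · simp [h']
      simp only [h, if_true]
      have e : s :: (front.reverse ++ c :: back) = (front ++ [s]).reverse ++ c :: back := by simp
      rw [e, ih c s (front ++ [s]) back (by simp)]
      simp [zipPre, hupd, h]
    · have hlt : s < m := lt_of_not_ge h
      have hupd : updC m s = m := by unfold updC; simp [not_lt_of_gt hlt]
      simp only [h, if_false]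
      have e : (front.reverse ++ c :: back) ++ [s] = front.reverse ++ c :: (back ++ [s]) := by simp
      rw [e, ih c m front (back ++ [s]) ?_]
      · simp [zipPre, hupd, h, hlt]
      · have hh : (front.reverse ++ c :: (back ++ [s])).head? = (front.reverse ++ c :: back).head? := by
          cases front.reverse <;> simp
        rw [hh]; exact hmx

-- ===== VERDICT (by name: the statement is the Claim_ definition above) =====
theorem solve_spec : Claim_equal_solve := by
  intro S _ hpre
  unfold Spec_solve solve solve_alt
  cases hl : S.toList with
  | nil =>
    exact absurd (by rw [← @String.ofList_toList S, hl]) hpre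
  | cons c rest =>
    have hpm : (pmFold (c :: rest) c).2 = c :: pmsL c rest := by
      unfold pmFold
      simp only [List.foldl_cons]
      have : (if c < c then c else c) = c := by simp
      rw [show (let m' := if c < c then c else c; (m', ([] : List Char) ++ [m']))
            = ((c : Char), [c]) by simp]
      rw [pmFold_snd]
      rfl
    have hz : rest.zip ((pmFold (c :: rest) c).2) = zipPre c rest := by
      rw [hpm]; exact zip_pms rest c
    have h := loop_eq rest c c [] [] (by simp)
    simp only [List.reverse_nil, List.nil_append] at h
    simp only [hz, h]
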